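-- pv_equiv track=rewrite | github.com/garikoitz/launchcontainers | launchcontainers/tests/show_bids_acqtimes.py | _modality_counts
-- ===== SOURCE A (Python) =====
-- MODALITIES = ("anat", "func", "dwi", "fmap")
--
-- def _modality_counts(cmp_rows: list[dict]) -> dict[str, dict[str, int]]:
--     """
--     Return per-modality status counts, e.g.:
--         {"anat": {"MATCH": 2, "MISSING": 1}, "func": {"MATCH": 12}, ...}
--     Skips SKIP rows.
--     """
--     counts: dict[str, dict[str, int]] = {m: {} for m in MODALITIES}
--     for r in cmp_rows:
--         if r["status"] == "SKIP":
--             continue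
--         mod = r["proto_mod"] or r["bids_mod"]
--         if not mod or mod not in counts:
--             continue
--         counts[mod][r["status"]] = counts[mod].get(r["status"], 0) + 1
--     return counts
-- ===== SOURCE B (Python) =====
-- from collections import Counter
--
-- MODALITIES = ("anat", "func", "dwi", "fmap")
--
-- def _modality_counts(cmp_rows: list[dict]) -> dict[str, dict[str, int]]:
--     # Inverted traversal: one filtered Counter pass per modality instead of
--     # a single fan-out pass updating nested dicts.
--     return {
--         m: dict(Counter(
--             r["status"] for r in cmp_rows
--             if r["status"] != "SKIP" and (r["proto_mod"] or r["bids_mod"]) == m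
--         ))
--         for m in MODALITIES
--     }
-- ===== Notes on version B (the rewrite author's own statement) =====
-- stated objective: alternative
-- what changed: Replaces the single fan-out pass that mutates a nested dict with a dict comprehension over the fixed MODALITIES tuple, computing each modality's counts by a separate filtered Counter pass over the rows.
import Mathlib
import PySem

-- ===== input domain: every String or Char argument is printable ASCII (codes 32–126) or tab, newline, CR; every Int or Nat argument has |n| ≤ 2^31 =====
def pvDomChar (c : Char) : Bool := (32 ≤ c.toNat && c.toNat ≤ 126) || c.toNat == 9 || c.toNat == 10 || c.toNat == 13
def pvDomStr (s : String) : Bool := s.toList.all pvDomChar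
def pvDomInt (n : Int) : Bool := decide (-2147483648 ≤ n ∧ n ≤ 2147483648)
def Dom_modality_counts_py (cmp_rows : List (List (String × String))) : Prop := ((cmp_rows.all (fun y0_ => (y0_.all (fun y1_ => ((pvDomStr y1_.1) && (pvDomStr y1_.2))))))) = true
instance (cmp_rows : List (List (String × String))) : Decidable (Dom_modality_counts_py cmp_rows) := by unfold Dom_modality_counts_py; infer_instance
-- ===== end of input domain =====

-- B builds the result by a comprehension over the fixed modality tuple (one filtered Counter
-- pass per modality) instead of A's single pass mutating a nested dict; same return value.

-- shared primitives for the Python expressions both sources contain: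
-- r[k] on a row-dict (assoc list, first match; none = KeyError) …
def rowGet? (r : List (String × String)) (k : String) : Option String :=
  (r.find? (fun p => p.1 == k)).map (·.2)
-- … and the expression  r["proto_mod"] or r["bids_mod"]  (none = KeyError)
def orMod? (r : List (String × String)) : Option String :=
  match rowGet? r "proto_mod" with
  | none => none
  | some pm => if pm ≠ "" then some pm else rowGet? r "bids_mod"

-- ===== PORT A =====
-- one iteration of A's loop body over the accumulated nested dict
def modA_step (counts : PySem.Dict String (PySem.Dict String Int))
    (r : List (String × String)) : PySem.Dict String (PySem.Dict String Int) :=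
  match rowGet? r "status" with
  | none => counts            -- KeyError (excluded by Pre_)
  | some st =>
    if st == "SKIP" then counts
    else
      match orMod? r with
      | none => counts        -- KeyError (excluded by Pre_)
      | some md =>
        if md == "" || !(counts.contains md) then counts
        else counts.modify md PySem.Dict.empty
               (fun d => d.insert st (d.getD st 0 + 1))

def modality_counts_py (cmp_rows : List (List (String × String))) : List (String × List (String × Int)) :=
  ((cmp_rows.foldl modA_step
      (["anat", "func", "dwi", "fmap"].foldl (fun d m => d.insert m PySem.Dict.empty)
        (PySem.Dict.empty : PySem.Dict String (PySem.Dict String Int)))).items).map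
    (fun p => (p.1, p.2.items))

-- ===== PORT B =====
-- the generator expression inside B's Counter: some status iff row r is counted for modality m
def selB (m : String) (r : List (String × String)) : Option String :=
  match rowGet? r "status" with
  | none => none              -- KeyError (excluded by Pre_)
  | some st =>
    if st != "SKIP" && (orMod? r == some m) then some st else none

def modality_counts_py_alt (cmp_rows : List (List (String × String))) : List (String × List (String × Int)) :=
  ["anat", "func", "dwi", "fmap"].map
    (fun m => (m, (PySem.Dict.counter (cmp_rows.filterMap (selB m))).items))

-- ===== PRECONDITION & SPEC =====
-- Pre_ excludes exactly the rows on which Python A raises KeyError: a row without a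
-- "status" key, or a non-SKIP row without "proto_mod", or one whose "proto_mod" is
-- empty and that lacks "bids_mod".
def Pre_modality_counts_py (cmp_rows : List (List (String × String))) : Prop :=
  (cmp_rows.all (fun r =>
    match rowGet? r "status" with
    | none => false
    | some st =>
      st == "SKIP" ||
      (match rowGet? r "proto_mod" with
       | none => false
       | some pm => pm != "" || (rowGet? r "bids_mod").isSome))) = true
instance (cmp_rows : List (List (String × String))) : Decidable (Pre_modality_counts_py cmp_rows) := by unfold Pre_modality_counts_py; infer_instance

def pvWitness_modality_counts_py : (List (List (String × String))) :=
  [[("status", "MATCH"), ("proto_mod", "anat"), ("bids_mod", "")],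
   [("status", "SKIP")],
   [("status", "MISSING"), ("proto_mod", ""), ("bids_mod", "func")]]

def Spec_modality_counts_py (cmp_rows : List (List (String × String))) (out : List (String × List (String × Int))) : Prop := out = modality_counts_py_alt cmp_rows
instance (cmp_rows : List (List (String × String))) (out : List (String × List (String × Int))) : Decidable (Spec_modality_counts_py cmp_rows out) := by unfold Spec_modality_counts_py; infer_instance

-- ===== CLAIM (what is proved, stated in full; the proofs are below) =====
def Claim_equal_modality_counts_py : Prop := ∀ (cmp_rows : List (List (String × String))), Dom_modality_counts_py cmp_rows → Pre_modality_counts_py cmp_rows → Spec_modality_counts_py cmp_rows (modality_counts_py cmp_rows)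

-- ===== LEMMAS AND PROOFS =====

-- one Counter increment (the function PySem.Dict.counter folds with)
def bump (d : PySem.Dict String Int) (st : String) : PySem.Dict String Int :=
  d.modify st 0 (· + 1)

-- the loop invariant: A's fold keeps the four fixed keys, each carrying the Counter fold
-- of exactly the statuses B's filter selects for that modality
theorem foldA_core (rows : List (List (String × String)))
    (da df dd dm : PySem.Dict String Int) :
    rows.foldl modA_step ⟨[("anat", da), ("func", df), ("dwi", dd), ("fmap", dm)]⟩
    = ⟨[("anat", (rows.filterMap (selB "anat")).foldl bump da),
        ("func", (rows.filterMap (selB "func")).foldl bump df),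
        ("dwi",  (rows.filterMap (selB "dwi")).foldl bump dd),
        ("fmap", (rows.filterMap (selB "fmap")).foldl bump dm)]⟩ := by
  induction rows generalizing da df dd dm with
  | nil => rfl
  | cons r rows ih =>
    simp only [List.foldl_cons, List.filterMap_cons]
    rcases hst : rowGet? r "status" with _ | st
    · have hB : ∀ m, selB m r = none := by intro m; simp [selB, hst]
      have hA : modA_step ⟨[("anat", da), ("func", df), ("dwi", dd), ("fmap", dm)]⟩ r
          = ⟨[("anat", da), ("func", df), ("dwi", dd), ("fmap", dm)]⟩ := by
        simp [modA_step, hst]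
      rw [hA]; simp only [hB]; exact ih da df dd dm
    · by_cases hsk : st = "SKIP"
      · have hB : ∀ m, selB m r = none := by intro m; simp [selB, hst, hsk]
        have hA : modA_step ⟨[("anat", da), ("func", df), ("dwi", dd), ("fmap", dm)]⟩ r
            = ⟨[("anat", da), ("func", df), ("dwi", dd), ("fmap", dm)]⟩ := by
          simp [modA_step, hst, hsk]
        rw [hA]; simp only [hB]; exact ih da df dd dm
      · have hskb : (st == "SKIP") = false := by simp [hsk]
        rcases hmo : orMod? r with _ | md
        · have hB : ∀ m, selB m r = none := by intro m; simp [selB, hst, hmo]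
          have hA : modA_step ⟨[("anat", da), ("func", df), ("dwi", dd), ("fmap", dm)]⟩ r
              = ⟨[("anat", da), ("func", df), ("dwi", dd), ("fmap", dm)]⟩ := by
            simp [modA_step, hst, hsk, hmo]
          rw [hA]; simp only [hB]; exact ih da df dd dm
        · have hB : ∀ m, md ≠ m → selB m r = none := by
            intro m hm; simp [selB, hst, hsk, hmo, hm]
          by_cases hanat : md = "anat"
          · subst hanat
            have hBa : selB "anat" r = some st := by simp [selB, hst, hsk, hmo]
            have hA : modA_step ⟨[("anat", da), ("func", df), ("dwi", dd), ("fmap", dm)]⟩ r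
                = ⟨[("anat", bump da st), ("func", df), ("dwi", dd), ("fmap", dm)]⟩ := by
              simp only [modA_step, hst, hmo, hskb, Bool.false_eq_true, if_false]
              rfl
            rw [hA, hBa]
            simp only [hB "func" (by decide), hB "dwi" (by decide), hB "fmap" (by decide),
              List.foldl_cons]
            exact ih (bump da st) df dd dm
          · by_cases hfunc : md = "func"
            · subst hfunc
              have hBa : selB "func" r = some st := by simp [selB, hst, hsk, hmo]
              have hA : modA_step ⟨[("anat", da), ("func", df), ("dwi", dd), ("fmap", dm)]⟩ r
                  = ⟨[("anat", da), ("func", bump df st), ("dwi", dd), ("fmap", dm)]⟩ := by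
                simp only [modA_step, hst, hmo, hskb, Bool.false_eq_true, if_false]
                rfl
              rw [hA, hBa]
              simp only [hB "anat" (by decide), hB "dwi" (by decide), hB "fmap" (by decide),
                List.foldl_cons]
              exact ih da (bump df st) dd dm
            · by_cases hdwi : md = "dwi"
              · subst hdwi
                have hBa : selB "dwi" r = some st := by simp [selB, hst, hsk, hmo]
                have hA : modA_step ⟨[("anat", da), ("func", df), ("dwi", dd), ("fmap", dm)]⟩ r
                    = ⟨[("anat", da), ("func", df), ("dwi", bump dd st), ("fmap", dm)]⟩ := by
                  simp only [modA_step, hst, hmo, hskb, Bool.false_eq_true, if_false]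
                  rfl
                rw [hA, hBa]
                simp only [hB "anat" (by decide), hB "func" (by decide), hB "fmap" (by decide),
                  List.foldl_cons]
                exact ih da df (bump dd st) dm
              · by_cases hfmap : md = "fmap"
                · subst hfmap
                  have hBa : selB "fmap" r = some st := by simp [selB, hst, hsk, hmo]
                  have hA : modA_step ⟨[("anat", da), ("func", df), ("dwi", dd), ("fmap", dm)]⟩ r
                      = ⟨[("anat", da), ("func", df), ("dwi", dd), ("fmap", bump dm st)]⟩ := by
                    simp only [modA_step, hst, hmo, hskb, Bool.false_eq_true, if_false]
                    rfl
                  rw [hA, hBa]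
                  simp only [hB "anat" (by decide), hB "func" (by decide), hB "dwi" (by decide),
                    List.foldl_cons]
                  exact ih da df dd (bump dm st)
                · have hc : (PySem.Dict.contains
                      (⟨[("anat", da), ("func", df), ("dwi", dd), ("fmap", dm)]⟩ :
                        PySem.Dict String (PySem.Dict String Int)) md) = false := by
                    simp [PySem.Dict.contains, Ne.symm hanat, Ne.symm hfunc, Ne.symm hdwi,
                      Ne.symm hfmap]
                  have hA : modA_step ⟨[("anat", da), ("func", df), ("dwi", dd), ("fmap", dm)]⟩ r
                      = ⟨[("anat", da), ("func", df), ("dwi", dd), ("fmap", dm)]⟩ := by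
                    simp [modA_step, hst, hskb, hmo, hc]
                  rw [hA]
                  simp only [hB "anat" hanat, hB "func" hfunc, hB "dwi" hdwi, hB "fmap" hfmap]
                  exact ih da df dd dm

-- the Counter fold from the empty dict IS PySem.Dict.counter
theorem foldl_bump_counter (l : List String) :
    l.foldl bump PySem.Dict.empty = PySem.Dict.counter l := rfl

-- ===== VERDICT (by name: the statement is the Claim_ definition above) =====
theorem modality_counts_py_spec : Claim_equal_modality_counts_py := by
  intro cmp_rows _ _
  unfold Spec_modality_counts_py modality_counts_py modality_counts_py_alt
  rw [show (["anat", "func", "dwi", "fmap"].foldl (fun d m => d.insert m PySem.Dict.empty)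
      (PySem.Dict.empty : PySem.Dict String (PySem.Dict String Int)))
      = ⟨[("anat", .empty), ("func", .empty), ("dwi", .empty), ("fmap", .empty)]⟩ from rfl,
    foldA_core]
  simp [foldl_bump_counter]
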